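-- pv_equiv track=rewrite | github.com/txje/Unicycler | lib/assembly_graph.py | split_path
-- ===== SOURCE A (Python) =====
-- def split_path(path, seg):
--     '''
--     If val is in the list, it returns multiple lists split at that point, excluding val.
--     Sort of like the string split function, but it throws out lists of 1 (because they aren't
--     useful as paths).
--     '''
--     return_paths = []
--     while seg in path:
--         seg_i = path.index(seg)
--         return_paths.append(path[:seg_i])
--         path = path[seg_i+1:]
--     return_paths.append(path)
--     return_paths = [x for x in return_paths if len(x) > 1]
--     return return_paths
-- ===== SOURCE B (Python) =====
-- def split_path(path, seg):
--     '''
--     If val is in the list, it returns multiple lists split at that point, excluding val.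
--     Sort of like the string split function, but it throws out lists of 1 (because they aren't
--     useful as paths).
--     '''
--     out = []
--     cur = []
--     for x in path:
--         if x == seg:
--             if len(cur) > 1:
--                 out.append(cur)
--             cur = []
--         else:
--             cur.append(x)
--     if len(cur) > 1:
--         out.append(cur)
--     return out
-- ===== Notes on version B (the rewrite author's own statement) =====
-- stated objective: alternative
-- what changed: Replaced the repeated 'seg in path' / path.index(seg) / slice-and-reassign loop by a single pass that accumulates the current sub-path, flushing it (kept only if its length exceeds 1) at each seg and at the end; it trades A's C-level scans and list copies for one Python-level traversal.
import Mathlib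
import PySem

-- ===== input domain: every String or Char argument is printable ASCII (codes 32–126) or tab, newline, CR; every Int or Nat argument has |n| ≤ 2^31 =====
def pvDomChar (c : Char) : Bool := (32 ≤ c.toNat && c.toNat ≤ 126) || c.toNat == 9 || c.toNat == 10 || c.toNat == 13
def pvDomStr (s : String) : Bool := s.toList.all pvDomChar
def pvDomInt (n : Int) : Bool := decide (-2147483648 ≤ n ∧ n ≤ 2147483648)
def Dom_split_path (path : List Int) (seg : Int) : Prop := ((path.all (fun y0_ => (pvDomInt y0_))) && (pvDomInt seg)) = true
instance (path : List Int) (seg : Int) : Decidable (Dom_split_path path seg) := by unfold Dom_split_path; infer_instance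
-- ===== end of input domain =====

-- B replaces A's repeated membership/index/slice loop by a single pass that accumulates each sub-path (alternative algorithm, same measured cost).


-- ===== PORT A =====
-- while seg in path: seg_i = path.index(seg); append path[:seg_i]; path = path[seg_i+1:]
-- (path.index(seg) is defined here since seg ∈ path; the slices path[:seg_i] and
-- path[seg_i+1:] with 0 ≤ seg_i < len(path) are exactly take/drop)
def split_path_loop (path : List Int) (seg : Int) (acc : List (List Int)) : List (List Int) :=
  if h : seg ∈ path then
    let seg_i := (PySem.List.index? path seg).getD 0
    split_path_loop (path.drop (seg_i + 1)) seg (acc ++ [path.take seg_i])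
  else acc ++ [path]
termination_by path.length
decreasing_by
  have hne : path ≠ [] := by intro he; rw [he] at h; simp at h
  have : 0 < path.length := List.length_pos_iff.mpr hne
  simp [List.length_drop]; omega

def split_path (path : List Int) (seg : Int) : List (List Int) :=
  (split_path_loop path seg []).filter (fun x => decide (1 < x.length))

-- ===== PORT B =====
-- one pass: state (out, cur); on seg flush cur (kept only if len > 1), else extend cur
def split_path_step (seg : Int) (st : List (List Int) × List Int) (x : Int) :
    List (List Int) × List Int :=
  if x = seg then (if 1 < st.2.length then st.1 ++ [st.2] else st.1, [])
  else (st.1, st.2 ++ [x])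

def split_path_alt (path : List Int) (seg : Int) : List (List Int) :=
  let st := path.foldl (split_path_step seg) ([], [])
  if 1 < st.2.length then st.1 ++ [st.2] else st.1

-- ===== PRECONDITION & SPEC =====
def Spec_split_path (path : List Int) (seg : Int) (out : List (List Int)) : Prop := out = split_path_alt path seg
instance (path : List Int) (seg : Int) (out : List (List Int)) : Decidable (Spec_split_path path seg out) := by unfold Spec_split_path; infer_instance

-- ===== CLAIM (what is proved, stated in full; the proofs are below) =====
def Claim_equal_split_path : Prop := ∀ (path : List Int) (seg : Int), Dom_split_path path seg → Spec_split_path path seg (split_path path seg)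

-- ===== LEMMAS AND PROOFS =====

-- one unfolding of A's loop, seg present
theorem loop_pos {path : List Int} {seg : Int} (h : seg ∈ path) (acc : List (List Int)) :
    split_path_loop path seg acc =
      split_path_loop (path.drop ((PySem.List.index? path seg).getD 0 + 1)) seg
        (acc ++ [path.take ((PySem.List.index? path seg).getD 0)]) := by
  conv_lhs => rw [split_path_loop]
  simp only [dif_pos h]

-- one unfolding of A's loop, seg absent
theorem loop_neg {path : List Int} {seg : Int} (h : seg ∉ path) (acc : List (List Int)) :
    split_path_loop path seg acc = acc ++ [path] := by
  conv_lhs => rw [split_path_loop]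
  simp only [dif_neg h]

-- A's loop accumulator pulls out
theorem split_path_loop_acc (n : Nat) : ∀ (path : List Int) (seg : Int) (acc : List (List Int)),
    path.length ≤ n → split_path_loop path seg acc = acc ++ split_path_loop path seg [] := by
  induction n with
  | zero =>
    intro path seg acc hl
    have hnil : path = [] := List.eq_nil_of_length_eq_zero (Nat.le_zero.mp hl)
    subst hnil
    rw [loop_neg (by simp) acc, loop_neg (by simp) []]
    simp
  | succ n ih =>
    intro path seg acc hl
    by_cases h : seg ∈ path
    · rw [loop_pos h acc, loop_pos h []]
      have hne : path ≠ [] := by intro he; rw [he] at h; simp at h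
      have hpos : 0 < path.length := List.length_pos_iff.mpr hne
      have hdl : (path.drop ((PySem.List.index? path seg).getD 0 + 1)).length ≤ n := by
        simp only [List.length_drop]; omega
      rw [ih _ _ _ hdl, ih _ _ ([] ++ [path.take _]) hdl]
      simp
    · rw [loop_neg h acc, loop_neg h []]
      simp

-- B's fold over a seg-free prefix just extends cur
theorem foldl_step_no_seg (seg : Int) : ∀ (p : List Int) (out : List (List Int)) (cur : List Int),
    seg ∉ p → p.foldl (split_path_step seg) (out, cur) = (out, cur ++ p) := by
  intro p
  induction p with
  | nil => intro out cur _; simp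
  | cons x xs ih =>
    intro out cur h
    have hx : x ≠ seg := fun he => h (by simp [he])
    have hxs : seg ∉ xs := fun hm => h (by simp [hm])
    simp only [List.foldl_cons, split_path_step, if_neg hx]
    rw [ih _ _ hxs]
    simp

-- first occurrence decomposition: index? at the split point
theorem index?_split {p rest : List Int} {seg : Int} (hp : seg ∉ p) :
    PySem.List.index? (p ++ seg :: rest) seg = some p.length :=
  (PySem.List.index?_eq_some_iff _ _ _).mpr ⟨p, rest, rfl, rfl, hp⟩

-- main: B with any out-accumulator (cur = []) equals out ++ filtered A-loop
theorem main_lemma (n : Nat) : ∀ (path : List Int) (seg : Int) (out : List (List Int)),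
    path.length ≤ n →
    (let st := path.foldl (split_path_step seg) (out, []);
     if 1 < st.2.length then st.1 ++ [st.2] else st.1)
      = out ++ (split_path_loop path seg []).filter (fun x => decide (1 < x.length)) := by
  induction n with
  | zero =>
    intro path seg out hl
    have hnil : path = [] := List.eq_nil_of_length_eq_zero (Nat.le_zero.mp hl)
    subst hnil
    rw [loop_neg (by simp) []]
    simp
  | succ n ih =>
    intro path seg out hl
    by_cases h : seg ∈ path
    · -- path = p ++ seg :: rest with seg ∉ p
      obtain ⟨k, hk⟩ := Option.isSome_iff_exists.mp ((PySem.List.index?_isSome_iff _ _).mpr h)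
      obtain ⟨p, rest, hpath, hlen, hnp⟩ := (PySem.List.index?_eq_some_iff _ _ _).mp hk
      subst hpath
      -- A side
      rw [loop_pos h []]
      rw [index?_split hnp]
      simp only [Option.getD_some]
      have htake : (p ++ seg :: rest).take p.length = p := by
        simp
      have hdrop : (p ++ seg :: rest).drop (p.length + 1) = rest := by
        rw [show p.length + 1 = (p ++ [seg]).length by simp,
            show p ++ seg :: rest = (p ++ [seg]) ++ rest by simp]
        exact List.drop_left
      rw [htake, hdrop]
      have hrl : rest.length ≤ n := by
        have hlen2 := hl; simp only [List.length_append, List.length_cons] at hlen2; omega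
      rw [split_path_loop_acc n rest seg ([] ++ [p]) hrl]
      -- B side
      have hfold : (p ++ seg :: rest).foldl (split_path_step seg) (out, ([] : List Int)) =
          rest.foldl (split_path_step seg)
            ((if 1 < p.length then out ++ [p] else out), ([] : List Int)) := by
        rw [List.foldl_append, foldl_step_no_seg seg p out [] hnp]
        simp [split_path_step]
      simp only [hfold]
      have hB := ih rest seg (if 1 < p.length then out ++ [p] else out) hrl
      simp only at hB ⊢
      rw [hB]
      by_cases hp1 : 1 < p.length <;> simp [hp1]
    · -- no seg: one piece
      rw [loop_neg h []]
      rw [foldl_step_no_seg seg path out [] h]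
      by_cases hp1 : 1 < path.length <;> simp [hp1]

-- ===== VERDICT (by name: the statement is the Claim_ definition above) =====
theorem split_path_spec : Claim_equal_split_path := by
  intro path seg _
  unfold Spec_split_path split_path split_path_alt
  have hm := main_lemma path.length path seg [] (le_refl _)
  simp only at hm
  rw [hm]
  simp
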